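-- pv_equiv track=rewrite | github.com/JasonHaenlin/Arms-and-Legs | logisim_project/assembly/instructions.py | putByte
-- ===== SOURCE A (Python) =====
-- def bin16(n):
--     """
--         Converts an 16-bits int to it's 16-bits binary form
--         Built-in bin function removes exceeding '0' at the
--         left of the result
--     """
--     return ''.join(str(1 & int(n) >> i) for i in range(16)[::-1])
--
-- def putByte(byte, maxrank, minrank, value):
--     """
--         Manipulates bits in a given 16-bits int
--         Writes value starting at rank minrank
--         and finishing at maxrank
--
--         putByte(128, 6, 3, 5) outputs 184
--         128: 0000000010000000
--         5:   0000000000000101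
--         184: 0000000010101000
--     """
--     if type(value) == str:
--         value = value.replace("#", "").replace("r", "").replace("R", "")
--     value = int(value)
--
--     mask = value * 2**minrank
--     i=15
--     while i>maxrank:
--         if bin16(mask)[15-i] == "1":
--             mask -= 2**i
--         i-=1
--     i=0
--     newbyte = 0
--     byte16 = bin16(byte)
--     mask16 = bin16(mask)
--     while i<=15:
--         if byte16[i] == "1" or mask16[i] == "1":
--             newbyte += 2**(15-i)
--         i+=1
--     return newbyte
-- ===== SOURCE B (Python) =====
-- def putByte(byte, maxrank, minrank, value):
--     if type(value) == str:
--         value = value.replace("#", "").replace("r", "").replace("R", "")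
--     value = int(value)
--     width = min(maxrank, 15) + 1
--     field = (value << minrank) & ((1 << width) - 1)
--     return (int(byte) & 0xFFFF) | field
-- ===== Notes on version B (the rewrite author's own statement) =====
-- stated objective: idiomatic
-- what changed: A's two bin16-string while loops (building 16-char binary strings and clearing/collecting bits character by character) are replaced by one closed-form bitwise expression (int(byte) & 0xFFFF) | ((value << minrank) & ((1 << (min(maxrank,15)+1)) - 1)).
-- outside the precondition, e.g. on putByte(5, 6, -2, 7): A returns 5, B raises ValueError; on putByte(5, -2, 0, 7): A raises IndexError, B raises ValueError
import Mathlib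
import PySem

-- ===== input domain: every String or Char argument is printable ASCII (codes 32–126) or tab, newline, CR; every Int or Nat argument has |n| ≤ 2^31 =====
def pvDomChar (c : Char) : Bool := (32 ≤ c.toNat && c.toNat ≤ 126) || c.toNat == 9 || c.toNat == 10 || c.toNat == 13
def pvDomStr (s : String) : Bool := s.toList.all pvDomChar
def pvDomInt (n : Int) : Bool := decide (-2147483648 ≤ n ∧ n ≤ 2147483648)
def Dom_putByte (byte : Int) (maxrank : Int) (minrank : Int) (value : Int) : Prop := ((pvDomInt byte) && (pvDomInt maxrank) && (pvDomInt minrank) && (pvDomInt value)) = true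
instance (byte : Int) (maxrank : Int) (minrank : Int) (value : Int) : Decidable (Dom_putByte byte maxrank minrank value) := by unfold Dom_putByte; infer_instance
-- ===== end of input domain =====

-- B replaces A's two bin16-string while loops by a closed-form bitwise expression
-- (byte & 0xFFFF) | ((value << minrank) & ((1 << (min(maxrank,15)+1)) - 1)); objective: idiomatic.


-- ===== PORT A =====
-- ''.join(str(1 & int(n) >> i) for i in range(16)[::-1])
def bin16 (n : Int) : String :=
  String.ofList (((List.range 16).reverse).map
    (fun (i : Nat) => if PySem.Int.band 1 (n >>> i) == 1 then '1' else '0'))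

def putByte (byte : Int) (maxrank : Int) (minrank : Int) (value : Int) : Int :=
  -- value is an Int here, so the `type(value) == str` branch is vacuous and value = int(value).
  -- mask = value * 2**minrank; exact for 0 ≤ minrank (Pre_ requires it: for negative minrank
  -- Python computes with a float 2**minrank)
  let mask0 := value * 2 ^ minrank.toNat
  -- `i = 15; while i > maxrank: … ; i -= 1` as a guarded fold over i = 15,14,…,0;
  -- exact for -1 ≤ maxrank (Pre_ requires it: for maxrank ≤ -2 Python raises IndexError at i = -1)
  let mask := ((List.range 16).reverse).foldl
    (fun m (i : Nat) => if (i : Int) > maxrank then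
        (if PySem.Str.pyGet? (bin16 m) (15 - (i : Int)) == some '1' then m - 2 ^ i else m)
      else m) mask0
  let byte16 := bin16 byte
  let mask16 := bin16 mask
  -- `i = 0; newbyte = 0; while i <= 15: … ; i += 1`
  (List.range 16).foldl
    (fun nb (i : Nat) => if PySem.Str.pyGet? byte16 (i : Int) == some '1' || PySem.Str.pyGet? mask16 (i : Int) == some '1'
      then nb + 2 ^ (15 - i) else nb) 0

-- ===== PORT B =====
def putByte_alt (byte : Int) (maxrank : Int) (minrank : Int) (value : Int) : Int :=
  let width := min maxrank 15 + 1
  let field := PySem.Int.band (value <<< minrank.toNat) ((1 : Int) <<< width.toNat - 1)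
  PySem.Int.bor (PySem.Int.band byte 65535) field

-- ===== PRECONDITION & SPEC =====
-- Pre_ excludes negative minrank (a negative shift count, outside the natural domain: A returns a value
-- there only via Python float 2**minrank arithmetic while B's `<<` raises ValueError) and maxrank ≤ -2
-- (A raises IndexError there).
def Pre_putByte (byte : Int) (maxrank : Int) (minrank : Int) (value : Int) : Prop :=
  0 ≤ minrank ∧ -1 ≤ maxrank
instance (byte : Int) (maxrank : Int) (minrank : Int) (value : Int) : Decidable (Pre_putByte byte maxrank minrank value) := by unfold Pre_putByte; infer_instance

def pvWitness_putByte : Int × Int × Int × Int := (128, 6, 3, 5)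

def Spec_putByte (byte : Int) (maxrank : Int) (minrank : Int) (value : Int) (out : Int) : Prop := out = putByte_alt byte maxrank minrank value
instance (byte : Int) (maxrank : Int) (minrank : Int) (value : Int) (out : Int) : Decidable (Spec_putByte byte maxrank minrank value out) := by unfold Spec_putByte; infer_instance

-- ===== CLAIM (what is proved, stated in full; the proofs are below) =====
def Claim_equal_putByte : Prop := ∀ (byte : Int) (maxrank : Int) (minrank : Int) (value : Int), Dom_putByte byte maxrank minrank value → Pre_putByte byte maxrank minrank value → Spec_putByte byte maxrank minrank value (putByte byte maxrank minrank value)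

-- ===== LEMMAS AND PROOFS =====

-- `1 & (m >> k) == 1` reads bit k of m
theorem cond_band (m : Int) (k : Nat) :
    (PySem.Int.band 1 (m >>> k) == 1) = decide (m / 2 ^ k % 2 = 1) := by
  rw [PySem.Int.band_comm, PySem.Int.band_one,
    PySem.Int.mod_eq_emod_of_pos (by norm_num), Int.shiftRight_eq_div_pow]
  push_cast
  rfl

-- the two's-complement "next bit" decomposition of an integer remainder
theorem mod_succ (M : Int) (k : Nat) :
    M % 2 ^ (k + 1) = M % 2 ^ k + 2 ^ k * (M / 2 ^ k % 2) := by
  have hp : (0:Int) < 2 ^ k := by positivity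
  have h1 : 2 ^ k * (M / 2 ^ k) + M % 2 ^ k = M := Int.ediv_add_emod M (2 ^ k)
  have h2 : 2 * (M / 2 ^ k / 2) + M / 2 ^ k % 2 = M / 2 ^ k := Int.ediv_add_emod (M / 2 ^ k) 2
  have hr0 : 0 ≤ M % 2 ^ k := Int.emod_nonneg M (by positivity)
  have hr1 : M % 2 ^ k < 2 ^ k := Int.emod_lt_of_pos M hp
  have hb : M / 2 ^ k % 2 = 0 ∨ M / 2 ^ k % 2 = 1 := Int.emod_two_eq_zero_or_one _
  have hM : M = (M % 2 ^ k + 2 ^ k * (M / 2 ^ k % 2)) + 2 ^ (k + 1) * (M / 2 ^ k / 2) := by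
    rw [pow_succ]; linear_combination -h1 - 2 ^ k * h2
  calc M % 2 ^ (k + 1)
      = ((M % 2 ^ k + 2 ^ k * (M / 2 ^ k % 2)) + 2 ^ (k + 1) * (M / 2 ^ k / 2)) % 2 ^ (k + 1) := by rw [← hM]
    _ = (M % 2 ^ k + 2 ^ k * (M / 2 ^ k % 2)) % 2 ^ (k + 1) := Int.add_mul_emod_self_left _ _ _
    _ = M % 2 ^ k + 2 ^ k * (M / 2 ^ k % 2) := by
        apply Int.emod_eq_of_lt
        · rcases hb with h | h <;> simp [h] <;> linarith
        · rw [pow_succ]; rcases hb with h | h <;> simp [h] <;> linarith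

-- bin16 m at (nonnegative, in-range) index j is the character of bit 15-j
theorem bin16_get (m : Int) (j : Nat) (hj : j < 16) :
    PySem.Str.pyGet? (bin16 m) (j : Int) = some (if m / 2 ^ (15 - j) % 2 = 1 then '1' else '0') := by
  rw [bin16, PySem.Str.pyGet?_eq]
  simp only [String.toList_ofList, PySem.Chars.pyGet?_eq_listPyGet?, PySem.List.pyGet?_natCast]
  rw [List.map_reverse, List.getElem?_reverse (by simpa using hj)]
  simp only [List.length_map, List.length_range]
  rw [List.getElem?_map, List.getElem?_range (by omega)]
  simp only [Option.map_some]
  rw [cond_band]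
  have h : 16 - 1 - j = 15 - j := by omega
  rw [h]
  by_cases hc : m / 2 ^ (15 - j) % 2 = 1 <;> simp [hc]

theorem cond_get (m : Int) (j : Nat) (hj : j < 16) :
    (PySem.Str.pyGet? (bin16 m) (j : Int) == some '1') = decide (m / 2 ^ (15 - j) % 2 = 1) := by
  rw [bin16_get m j hj]
  by_cases h : m / 2 ^ (15 - j) % 2 = 1 <;> simp [h]

-- clearing a set bit k is subtracting 2^k
theorem step_eq (M : Int) (k : Nat) :
    (if M / 2 ^ k % 2 = 1 then M - 2 ^ k else M) = M - (M % 2 ^ (k + 1) - M % 2 ^ k) := by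
  rw [mod_succ]
  rcases Int.emod_two_eq_zero_or_one (M / 2 ^ k) with h | h <;> simp [h]

-- A's first while loop, characterised: clearing set bits top-down above mr keeps only the low min(mr+1,n) bits
theorem clear_loop (mr : Int) (hmr : -1 ≤ mr) : ∀ (n : Nat) (M : Int),
    ((List.range n).reverse).foldl
      (fun m (i : Nat) => if (i : Int) > mr then (if m / 2 ^ i % 2 = 1 then m - 2 ^ i else m) else m) M
    = M - (M % 2 ^ n - M % 2 ^ (min (mr + 1).toNat n)) := by
  intro n
  induction n with
  | zero => intro M; simp
  | succ n ih =>
    intro M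
    rw [List.range_succ, List.reverse_append, List.reverse_singleton, List.singleton_append,
      List.foldl_cons]
    by_cases h : (n : Int) > mr
    · have ht : (mr + 1).toNat ≤ n := by omega
      have hmin1 : min (mr + 1).toNat n = (mr + 1).toNat := by omega
      have hmin2 : min (mr + 1).toNat (n + 1) = (mr + 1).toNat := by omega
      rw [if_pos h, step_eq, ih, hmin1, hmin2]
      set t := (mr + 1).toNat
      set c := M / 2 ^ n % 2 with hc
      have hstep : M % 2 ^ (n + 1) - M % 2 ^ n = 2 ^ n * c := by rw [mod_succ]; ring
      have hM' : M - (M % 2 ^ (n + 1) - M % 2 ^ n) = M + 2 ^ n * (-c) := by rw [hstep]; ring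
      have hmodn : (M + 2 ^ n * (-c)) % 2 ^ n = M % 2 ^ n := Int.add_mul_emod_self_left _ _ _
      have hpow : (2:Int) ^ n = 2 ^ t * 2 ^ (n - t) := by rw [← pow_add]; congr 1; omega
      have hmodt : (M + 2 ^ n * (-c)) % 2 ^ t = M % 2 ^ t := by
        have hrw : M + 2 ^ n * (-c) = M + 2 ^ t * (2 ^ (n - t) * (-c)) := by rw [hpow]; ring
        rw [hrw]; exact Int.add_mul_emod_self_left _ _ _
      rw [hM', hmodn, hmodt, mod_succ, ← hc]
      ring
    · have hmin1 : min (mr + 1).toNat n = n := by omega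
      have hmin2 : min (mr + 1).toNat (n + 1) = n + 1 := by omega
      rw [if_neg h, ih, hmin1, hmin2]
      ring

-- a bit below k only depends on the remainder mod 2^k
theorem bit_mod (x : Int) (j k : Nat) (hjk : j < k) :
    x % 2 ^ k / 2 ^ j % 2 = x / 2 ^ j % 2 := by
  conv_rhs => rw [← Int.emod_add_ediv x (2 ^ k)]
  have hpow : (2:Int) ^ k = 2 ^ j * 2 ^ (k - j) := by rw [← pow_add]; congr 1; omega
  have h1 : x % 2 ^ k + 2 ^ k * (x / 2 ^ k) = x % 2 ^ k + 2 ^ j * (2 ^ (k - j) * (x / 2 ^ k)) := by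
    rw [hpow]; ring
  rw [h1, Int.add_mul_ediv_left _ _ (by positivity : (2:Int) ^ j ≠ 0)]
  have h2 : (2:Int) ^ (k - j) * (x / 2 ^ k) = 2 * (2 ^ (k - j - 1) * (x / 2 ^ k)) := by
    have h3 : (2:Int) ^ (k - j) = 2 * 2 ^ (k - j - 1) := by
      rw [← pow_succ']; congr 1; omega
    rw [h3]; ring
  rw [h2, Int.add_mul_emod_self_left]

-- the or-of-bits sum is the integer `|` of the two (nonnegative) numbers, mod 2^n
theorem sum_or_bits (a b : Int) (ha : 0 ≤ a) (hb : 0 ≤ b) : ∀ (n : Nat),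
    ((List.range n).map (fun j => if a / 2 ^ j % 2 = 1 ∨ b / 2 ^ j % 2 = 1 then (2:Int) ^ j else 0)).sum
    = ((a.toNat ||| b.toNat) % 2 ^ n : Nat) := by
  obtain ⟨aN, rfl⟩ : ∃ m : Nat, a = (m : Int) := ⟨a.toNat, (Int.toNat_of_nonneg ha).symm⟩
  obtain ⟨bN, rfl⟩ : ∃ m : Nat, b = (m : Int) := ⟨b.toNat, (Int.toNat_of_nonneg hb).symm⟩
  simp only [Int.toNat_natCast]
  intro n
  induction n with
  | zero => simp
  | succ n ih =>
    rw [List.range_succ, List.map_append, List.sum_append]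
    simp only [List.map_cons, List.map_nil, List.sum_cons, List.sum_nil, add_zero]
    rw [ih]
    have hda : (aN : Int) / 2 ^ n % 2 = ((aN / 2 ^ n % 2 : Nat) : Int) := by push_cast; ring
    have hdb : (bN : Int) / 2 ^ n % 2 = ((bN / 2 ^ n % 2 : Nat) : Int) := by push_cast; ring
    have hcast1 : (((aN ||| bN) % 2 ^ (n + 1) : Nat) : Int) = ((aN ||| bN : Nat) : Int) % 2 ^ (n + 1) := by
      push_cast; ring
    have hcast2 : (((aN ||| bN) % 2 ^ n : Nat) : Int) = ((aN ||| bN : Nat) : Int) % 2 ^ n := by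
      push_cast; ring
    have hx : ((aN ||| bN : Nat) : Int) / 2 ^ n % 2 = (((aN ||| bN) / 2 ^ n % 2 : Nat) : Int) := by
      push_cast; ring
    rw [hda, hdb, hcast1, hcast2, mod_succ, hx]
    have hlor := Nat.testBit_lor aN bN n
    simp only [Nat.testBit_eq_decide_div_mod_eq] at hlor
    by_cases hca : aN / 2 ^ n % 2 = 1 <;> by_cases hcb : bN / 2 ^ n % 2 = 1
    · have hl : (aN ||| bN) / 2 ^ n % 2 = 1 := by revert hlor; simp [hca, hcb]
      simp only [hca, hcb, hl, Nat.cast_one, mul_one, or_self, if_pos]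
    · have hl : (aN ||| bN) / 2 ^ n % 2 = 1 := by revert hlor; simp [hca, hcb]
      simp only [Nat.cast_eq_one, hca, hcb, hl, Nat.cast_one, mul_one, or_false, if_pos]
    · have hl : (aN ||| bN) / 2 ^ n % 2 = 1 := by revert hlor; simp [hca, hcb]
      simp only [Nat.cast_eq_one, hca, hcb, hl, Nat.cast_one, mul_one, false_or, if_pos]
    · have hl : (aN ||| bN) / 2 ^ n % 2 = 0 := by revert hlor; simp [hca, hcb]
      simp only [Nat.cast_eq_one, hca, hcb, hl, Nat.cast_zero, mul_zero, or_self, if_neg,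
        not_false_eq_true, add_zero]

-- Python `x & (2^k - 1)` is the remainder mod 2^k, for every (also negative) x
theorem band_mask (a : Int) (k : Nat) :
    PySem.Int.band a (2 ^ k - 1) = a % 2 ^ k := by
  have hone : (1:Int) ≤ 2 ^ k := by
    have := pow_pos (by norm_num : (0:Int) < 2) k; omega
  by_cases ha : 0 ≤ a
  · rw [PySem.Int.band_of_nonneg ha (by omega)]
    have htn : ((2:Int) ^ k - 1).toNat = 2 ^ k - 1 := by
      have : ((2 ^ k : Nat) : Int) = 2 ^ k := by push_cast; ring
      omega
    rw [htn, Nat.and_two_pow_sub_one_eq_mod]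
    conv_rhs => rw [← Int.toNat_of_nonneg ha]
    push_cast; ring
  · rw [PySem.Int.band]
    rw [if_neg ha, if_pos (by omega : (0:Int) ≤ 2 ^ k - 1)]
    have hpowcast : ((2 ^ k : Nat) : Int) = 2 ^ k := by push_cast; ring
    have htn : ((2:Int) ^ k - 1).toNat = 2 ^ k - 1 := by omega
    rw [htn, Nat.and_comm, Nat.and_two_pow_sub_one_eq_mod]
    set m := (-a - 1).toNat with hm
    have ham : a = -(m : Int) - 1 := by omega
    have hdm : (m : Int) = 2 ^ k * ((m / 2 ^ k : Nat) : Int) + ((m % 2 ^ k : Nat) : Int) := by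
      push_cast
      exact_mod_cast (Nat.div_add_mod m (2 ^ k)).symm
    have hmlt : ((m % 2 ^ k : Nat) : Int) < 2 ^ k := by
      have := Nat.mod_lt m (y := 2 ^ k) (by positivity)
      omega
    have hmnn : (0:Int) ≤ ((m % 2 ^ k : Nat) : Int) := by positivity
    have hz : ((2 ^ k - 1 - m % 2 ^ k : Nat) : Int) = 2 ^ k - 1 - ((m % 2 ^ k : Nat) : Int) := by
      omega
    rw [hz, ham]
    have hcong : (-(m:Int) - 1) % 2 ^ k = (2 ^ k - 1 - ((m % 2 ^ k : Nat) : Int)) % 2 ^ k := by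
      apply Int.emod_eq_emod_iff_emod_sub_eq_zero.mpr
      have hfac : (-(m:Int) - 1) - (2 ^ k - 1 - ((m % 2 ^ k : Nat) : Int))
          = 2 ^ k * (-(((m / 2 ^ k : Nat) : Int)) - 1) := by
        linear_combination -hdm
      rw [hfac]
      exact Int.mul_emod_right _ _
    rw [hcong, Int.emod_eq_of_lt (by omega) (by omega)]

-- ===== VERDICT (by name: the statement is the Claim_ definition above) =====
theorem putByte_spec : Claim_equal_putByte := by
  intro byte maxrank minrank value _ hpre
  obtain ⟨hmin, hmax⟩ := hpre
  unfold Spec_putByte putByte putByte_alt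
  simp only []
  set M := value * 2 ^ minrank.toNat with hMdef
  -- B-side: shifts and masks to remainders
  rw [Int.shiftLeft_eq, Int.shiftLeft_eq, one_mul]
  have h65 : (65535 : Int) = 2 ^ 16 - 1 := by norm_num
  rw [h65, band_mask, band_mask]
  -- A-side: first loop
  have hfold1 : ((List.range 16).reverse).foldl
      (fun m (i : Nat) => if (i : Int) > maxrank then
        (if PySem.Str.pyGet? (bin16 m) (15 - (i : Int)) == some '1' then m - 2 ^ i else m)
      else m) M
      = ((List.range 16).reverse).foldl
      (fun m (i : Nat) => if (i : Int) > maxrank then (if m / 2 ^ i % 2 = 1 then m - 2 ^ i else m) else m) M := by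
    apply PySem.List.foldl_congr_mem
    intro acc i hi
    have hi16 : i < 16 := by
      have := List.mem_reverse.mp hi
      simpa using this
    have hidx : (15 : Int) - (i : Int) = ((15 - i : Nat) : Int) := by omega
    have hexp : 15 - (15 - i) = i := by omega
    rw [hidx, cond_get acc (15 - i) (by omega), hexp]
    by_cases hc : acc / 2 ^ i % 2 = 1 <;> simp [hc]
  rw [hfold1, clear_loop maxrank hmax 16 M]
  set w := min (maxrank + 1).toNat 16 with hwdef
  set mask' := M - (M % 2 ^ 16 - M % 2 ^ w) with hmask'def
  have hww : (min maxrank 15 + 1).toNat = w := by omega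
  rw [hww]
  -- the field and the low 16 bits of mask' agree
  have hw16 : w ≤ 16 := by omega
  have hblt : M % 2 ^ w < 2 ^ 16 :=
    lt_of_lt_of_le (Int.emod_lt_of_pos M (by positivity)) (pow_le_pow_right₀ (by norm_num) hw16)
  have hb0 : (0:Int) ≤ M % 2 ^ w := Int.emod_nonneg M (by positivity)
  have hmask16 : mask' % 2 ^ 16 = M % 2 ^ w := by
    have hMsplit : mask' = M % 2 ^ w + 2 ^ 16 * (M / 2 ^ 16) := by
      rw [hmask'def]
      have h := Int.ediv_add_emod M (2 ^ 16)
      linear_combination -h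
    rw [hMsplit, Int.add_mul_emod_self_left, Int.emod_eq_of_lt hb0 hblt]
  -- A-side: second loop as a sum of or-bits
  have hfold2 : (List.range 16).foldl
      (fun nb (i : Nat) => if PySem.Str.pyGet? (bin16 byte) (i : Int) == some '1' || PySem.Str.pyGet? (bin16 mask') (i : Int) == some '1'
        then nb + 2 ^ (15 - i) else nb) 0
      = (List.range 16).foldl
      (fun nb (i : Nat) => nb + (if (byte % 2 ^ 16) / 2 ^ (15 - i) % 2 = 1 ∨ (M % 2 ^ w) / 2 ^ (15 - i) % 2 = 1 then (2:Int) ^ (15 - i) else 0)) 0 := by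
    apply PySem.List.foldl_congr_mem
    intro acc i hi
    have hi16 : i < 16 := List.mem_range.mp hi
    have hj16 : 15 - i < 16 := by omega
    rw [cond_get byte i hi16, cond_get mask' i hi16]
    rw [bit_mod byte (15 - i) 16 hj16, ← hmask16, bit_mod mask' (15 - i) 16 hj16]
    by_cases h1 : byte / 2 ^ (15 - i) % 2 = 1 <;> by_cases h2 : mask' / 2 ^ (15 - i) % 2 = 1 <;>
      simp [h1, h2]
  rw [hfold2]
  have hfadd := PySem.List.foldl_add (List.range 16)
    (fun (i : Nat) => if (byte % 2 ^ 16) / 2 ^ (15 - i) % 2 = 1 ∨ (M % 2 ^ w) / 2 ^ (15 - i) % 2 = 1 then (2:Int) ^ (15 - i) else 0) 0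
  rw [hfadd, zero_add]
  -- reindex the sum from exponents 15-i to exponents j
  set a := byte % 2 ^ 16 with hadef
  set b := M % 2 ^ w with hbdef
  have hrev : ((List.range 16).map (fun (i : Nat) => if a / 2 ^ (15 - i) % 2 = 1 ∨ b / 2 ^ (15 - i) % 2 = 1 then (2:Int) ^ (15 - i) else 0)).sum
      = ((List.range 16).map (fun (j : Nat) => if a / 2 ^ j % 2 = 1 ∨ b / 2 ^ j % 2 = 1 then (2:Int) ^ j else 0)).sum := by
    simp only [List.range_succ, List.range_zero, List.map_cons, List.map_nil,
      List.sum_cons, List.sum_nil, List.nil_append, List.cons_append, add_zero]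
    norm_num
    ring
  rw [hrev, sum_or_bits a b (Int.emod_nonneg byte (by positivity)) hb0 16]
  have halt : a < 2 ^ 16 := Int.emod_lt_of_pos byte (by positivity)
  have ha0 : (0:Int) ≤ a := Int.emod_nonneg byte (by positivity)
  have haN : a.toNat < 2 ^ 16 := by
    have hc : ((2 ^ 16 : Nat) : Int) = 2 ^ 16 := by norm_num
    omega
  have hbN : b.toNat < 2 ^ 16 := by
    have hc : ((2 ^ 16 : Nat) : Int) = 2 ^ 16 := by norm_num
    omega
  rw [Nat.mod_eq_of_lt (Nat.or_lt_two_pow haN hbN), PySem.Int.bor_of_nonneg ha0 hb0]
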